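-- pv_equiv track=rewrite | github.com/fasiluva/Reversi | python/jugadas.py | generaDiagonalSup
-- ===== SOURCE A (Python) =====
-- def generaDiagonalSup(fichaVerifica, fichasJugador, fichasMaquina, turno):
--
--     # generaDiagonalSup :: (int, int) set((int, int)) set((int, int)) string -> bool
--     # Analiza si la ficha genera cambios diagonalmente, hacia la derecha o hacia la izquierda.
--     # En caso de hacerlo en algun sentido, devuelve True.
--
--     if turno == "jugador":
--
--         contadorColumna = fichaVerifica[0] + 1
--         contadorFila = fichaVerifica[1] - 1
--
--         while contadorColumna <= 8 and contadorFila >= 1 and (contadorColumna, contadorFila) in fichasMaquina: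
--
--             if (contadorColumna + 1, contadorFila - 1) in fichasJugador:
--
--                 return True
--
--             contadorColumna += 1
--             contadorFila -= 1
--
--
--         contadorColumna = fichaVerifica[0] - 1
--         contadorFila = fichaVerifica[1] + 1
--
--         while contadorColumna >= 1 and contadorFila <= 8 and (contadorColumna, contadorFila) in fichasMaquina:
--
--             if (contadorColumna - 1, contadorFila + 1) in fichasJugador:
--
--                 return True
--
--             contadorColumna -= 1
--             contadorFila += 1
--
--
--         return False
--
--     else:
--
--         contadorColumna = fichaVerifica[0] + 1
--         contadorFila = fichaVerifica[1] - 1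
--
--         while contadorColumna <= 8 and contadorFila >= 1 and (contadorColumna, contadorFila) in fichasJugador:
--
--             if (contadorColumna + 1, contadorFila - 1) in fichasMaquina:
--
--                 return True
--
--             contadorColumna += 1
--             contadorFila -= 1
--
--
--         contadorColumna = fichaVerifica[0] - 1
--         contadorFila = fichaVerifica[1] + 1
--
--         while contadorColumna >= 1 and contadorFila <= 8 and (contadorColumna, contadorFila) in fichasJugador:
--
--             if (contadorColumna - 1, contadorFila + 1) in fichasMaquina:
--
--                 return True
--
--             contadorColumna -= 1
--             contadorFila += 1
--
--
--         return False
-- ===== SOURCE B (Python) =====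
-- def generaDiagonalSup(fichaVerifica, fichasJugador, fichasMaquina, turno):
--     # Different algorithm: instead of walking the diagonal cell by cell, scan the
--     # list of OWN pieces once; the move flips a line iff some own piece lies on the
--     # same anti-diagonal at signed distance |t| >= 2 and every cell strictly
--     # between is an on-board opponent piece.
--     if turno == "jugador":
--         propias, contrarias = fichasJugador, fichasMaquina
--     else:
--         propias, contrarias = fichasMaquina, fichasJugador
--     opp = set(contrarias)
--     c0, f0 = fichaVerifica
--     for (pc, pf) in propias:
--         if pc + pf == c0 + f0:
--             t = pc - c0
--             if t >= 2:
--                 if all(f0 - i >= 1 and c0 + i <= 8 and (c0 + i, f0 - i) in opp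
--                        for i in range(1, t)):
--                     return True
--             elif t <= -2:
--                 if all(c0 + j >= 1 and f0 - j <= 8 and (c0 + j, f0 - j) in opp
--                        for j in range(t + 1, 0)):
--                     return True
--     return False
-- ===== Notes on version B (the rewrite author's own statement) =====
-- stated objective: alternative
-- what changed: Instead of walking the diagonal cell by cell through the opponent set (A's four while loops), B scans the list of own pieces once and, for each own piece on the same anti-diagonal at distance >= 2, verifies that every strictly intermediate cell is an on-board opponent piece.
import Mathlib
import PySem

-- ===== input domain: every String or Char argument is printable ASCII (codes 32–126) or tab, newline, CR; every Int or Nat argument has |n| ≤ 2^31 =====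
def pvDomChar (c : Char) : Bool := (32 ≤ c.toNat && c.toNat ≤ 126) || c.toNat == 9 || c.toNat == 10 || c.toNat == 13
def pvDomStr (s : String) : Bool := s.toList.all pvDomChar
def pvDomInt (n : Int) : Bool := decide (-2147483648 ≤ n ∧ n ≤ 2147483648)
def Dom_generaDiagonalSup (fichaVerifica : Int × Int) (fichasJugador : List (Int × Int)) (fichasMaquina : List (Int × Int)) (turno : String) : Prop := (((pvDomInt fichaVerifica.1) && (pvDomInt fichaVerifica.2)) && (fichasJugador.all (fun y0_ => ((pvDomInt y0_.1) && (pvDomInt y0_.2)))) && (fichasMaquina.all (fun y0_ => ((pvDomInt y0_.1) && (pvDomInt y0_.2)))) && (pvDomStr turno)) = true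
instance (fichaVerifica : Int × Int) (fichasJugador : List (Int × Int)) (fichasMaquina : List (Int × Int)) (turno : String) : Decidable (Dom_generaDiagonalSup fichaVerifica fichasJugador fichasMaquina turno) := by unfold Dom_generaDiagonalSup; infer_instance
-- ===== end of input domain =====

-- B replaces A's cell-by-cell diagonal walk (four while loops) by a single scan of
-- the OWN pieces, checking each anti-diagonal candidate's intermediate cells;
-- objective: alternative algorithm of similar cost.

-- ===== PORT A =====
-- A's first/third while loop (direction (+1,-1)): scans `opp`, returns True when the
-- next diagonal cell is in `own`. The Python loop carries no fuel; it runs at most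
-- |opp| iterations (the visited cells are distinct and each must be in `opp`), so
-- fuel = opp.length + 1 makes the recursion total without changing the behaviour.
def pvALoopR (own opp : List (Int × Int)) : Nat → Int → Int → Bool
  | 0, _, _ => false
  | n+1, c, f =>
    if c ≤ 8 ∧ f ≥ 1 ∧ (c, f) ∈ opp then
      if (c + 1, f - 1) ∈ own then true else pvALoopR own opp n (c + 1) (f - 1)
    else false

-- A's second/fourth while loop (direction (-1,+1)).
def pvALoopL (own opp : List (Int × Int)) : Nat → Int → Int → Bool
  | 0, _, _ => false
  | n+1, c, f =>
    if c ≥ 1 ∧ f ≤ 8 ∧ (c, f) ∈ opp then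
      if (c - 1, f + 1) ∈ own then true else pvALoopL own opp n (c - 1) (f + 1)
    else false

def generaDiagonalSup (fichaVerifica : Int × Int) (fichasJugador : List (Int × Int)) (fichasMaquina : List (Int × Int)) (turno : String) : Bool :=
  if turno == "jugador" then
    if pvALoopR fichasJugador fichasMaquina (fichasMaquina.length + 1) (fichaVerifica.1 + 1) (fichaVerifica.2 - 1) then true
    else pvALoopL fichasJugador fichasMaquina (fichasMaquina.length + 1) (fichaVerifica.1 - 1) (fichaVerifica.2 + 1)
  else
    if pvALoopR fichasMaquina fichasJugador (fichasJugador.length + 1) (fichaVerifica.1 + 1) (fichaVerifica.2 - 1) then true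
    else pvALoopL fichasMaquina fichasJugador (fichasJugador.length + 1) (fichaVerifica.1 - 1) (fichaVerifica.2 + 1)

-- ===== PORT B =====
-- Source B's `all(... for i in range(1, t))`: every cell strictly between the start and
-- the own piece at distance t in direction (+1,-1) is an on-board opponent cell.
def pvBBetweenR (opp : PySem.Set (Int × Int)) (c0 f0 t : Int) : Bool :=
  (PySem.List.pyRange 1 t 1).all
    (fun i => decide (f0 - i ≥ 1) && decide (c0 + i ≤ 8) && decide ((c0 + i, f0 - i) ∈ opp))

-- Source B's `all(... for j in range(t + 1, 0))` (direction (-1,+1), t ≤ -2).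
def pvBBetweenL (opp : PySem.Set (Int × Int)) (c0 f0 t : Int) : Bool :=
  (PySem.List.pyRange (t + 1) 0 1).all
    (fun j => decide (c0 + j ≥ 1) && decide (f0 - j ≤ 8) && decide ((c0 + j, f0 - j) ∈ opp))

def generaDiagonalSup_alt (fichaVerifica : Int × Int) (fichasJugador : List (Int × Int)) (fichasMaquina : List (Int × Int)) (turno : String) : Bool :=
  let pc := if turno == "jugador" then (fichasJugador, fichasMaquina) else (fichasMaquina, fichasJugador)
  let opp := PySem.Set.ofList pc.2
  pc.1.any (fun p =>
    if p.1 + p.2 == fichaVerifica.1 + fichaVerifica.2 then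
      let t := p.1 - fichaVerifica.1
      if t ≥ 2 then pvBBetweenR opp fichaVerifica.1 fichaVerifica.2 t
      else if t ≤ -2 then pvBBetweenL opp fichaVerifica.1 fichaVerifica.2 t
      else false
    else false)

-- ===== PRECONDITION & SPEC =====
def Spec_generaDiagonalSup (fichaVerifica : Int × Int) (fichasJugador : List (Int × Int)) (fichasMaquina : List (Int × Int)) (turno : String) (out : Bool) : Prop := out = generaDiagonalSup_alt fichaVerifica fichasJugador fichasMaquina turno
instance (fichaVerifica : Int × Int) (fichasJugador : List (Int × Int)) (fichasMaquina : List (Int × Int)) (turno : String) (out : Bool) : Decidable (Spec_generaDiagonalSup fichaVerifica fichasJugador fichasMaquina turno out) := by unfold Spec_generaDiagonalSup; infer_instance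

-- ===== CLAIM (what is proved, stated in full; the proofs are below) =====
def Claim_equal_generaDiagonalSup : Prop := ∀ (fichaVerifica : Int × Int) (fichasJugador : List (Int × Int)) (fichasMaquina : List (Int × Int)) (turno : String), Dom_generaDiagonalSup fichaVerifica fichasJugador fichasMaquina turno → Spec_generaDiagonalSup fichaVerifica fichasJugador fichasMaquina turno (generaDiagonalSup fichaVerifica fichasJugador fichasMaquina turno)

-- ===== LEMMAS AND PROOFS =====

-- The common characterisation of one direction, as a Prop over the start cell.
def pvPropR (own opp : List (Int × Int)) (c0 f0 : Int) : Prop :=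
  ∃ k : Nat, (∀ j : Nat, j ≤ k → ((c0 + 1) + (j:Int) ≤ 8 ∧ (f0 - 1) - (j:Int) ≥ 1 ∧ ((c0 + 1) + (j:Int), (f0 - 1) - (j:Int)) ∈ opp))
    ∧ ((c0 + 1) + (k:Int) + 1, (f0 - 1) - (k:Int) - 1) ∈ own

def pvPropL (own opp : List (Int × Int)) (c0 f0 : Int) : Prop :=
  ∃ k : Nat, (∀ j : Nat, j ≤ k → ((c0 - 1) - (j:Int) ≥ 1 ∧ (f0 + 1) + (j:Int) ≤ 8 ∧ ((c0 - 1) - (j:Int), (f0 + 1) + (j:Int)) ∈ opp))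
    ∧ ((c0 - 1) - (k:Int) - 1, (f0 + 1) + (k:Int) + 1) ∈ own

-- distinctness: k+1 distinct cells of the diagonal all lie in opp, so k < |opp|
lemma pv_k_lt {opp : List (Int × Int)} {c f : Int} {k : Nat}
    (h : ∀ j : Nat, j ≤ k → (c + (j:Int), f - (j:Int)) ∈ opp) : k < opp.length := by
  have hinj : Function.Injective (fun j : Nat => ((c + (j:Int), f - (j:Int)) : Int × Int)) := by
    intro a b hab
    simp only [Prod.mk.injEq] at hab
    omega
  have hnd : ((List.range (k+1)).map (fun j : Nat => ((c + (j:Int), f - (j:Int)) : Int × Int))).Nodup :=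
    (List.nodup_range).map hinj
  have hsub : ((List.range (k+1)).map (fun j : Nat => ((c + (j:Int), f - (j:Int)) : Int × Int))) ⊆ opp := by
    intro x hx
    simp only [List.mem_map, List.mem_range] at hx
    obtain ⟨j, hj, rfl⟩ := hx
    exact h j (by omega)
  have := (List.subperm_of_subset hnd hsub).length_le
  simp at this
  omega

lemma pv_pair_eq {a b x y : Int} (h1 : a = x) (h2 : b = y) : ((a, b) : Int × Int) = (x, y) := by
  rw [h1, h2]

lemma pvALoopR_iff (own opp : List (Int × Int)) :
    ∀ (n : Nat) (c f : Int), pvALoopR own opp n c f = true ↔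
      ∃ k : Nat, k < n ∧
        (∀ j : Nat, j ≤ k → (c + (j:Int) ≤ 8 ∧ f - (j:Int) ≥ 1 ∧ (c + (j:Int), f - (j:Int)) ∈ opp))
        ∧ (c + (k:Int) + 1, f - (k:Int) - 1) ∈ own := by
  intro n
  induction n with
  | zero => intro c f; simp [pvALoopR]
  | succ n ih =>
    intro c f
    by_cases hc : c ≤ 8 ∧ f ≥ 1 ∧ (c, f) ∈ opp
    · by_cases hh : (c + 1, f - 1) ∈ own
      · rw [pvALoopR, if_pos hc, if_pos hh]
        constructor
        · intro _
          refine ⟨0, by omega, ?_, ?_⟩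
          · intro j hj
            interval_cases j
            simpa using hc
          · have e : ((c + ((0:Nat):Int) + 1, f - ((0:Nat):Int) - 1) : Int × Int) = (c + 1, f - 1) :=
              pv_pair_eq (by push_cast; ring) (by push_cast; ring)
            rw [e]; exact hh
        · intro _; rfl
      · rw [pvALoopR, if_pos hc, if_neg hh, ih]
        constructor
        · rintro ⟨k, hk, hall, hhit⟩
          refine ⟨k + 1, by omega, ?_, ?_⟩
          · intro j hj
            cases j with
            | zero => simpa using hc
            | succ i =>
              have h2 := hall i (by omega)
              refine ⟨by push_cast; omega, by push_cast; omega, ?_⟩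
              have e : ((c + ((i+1:Nat):Int), f - ((i+1:Nat):Int)) : Int × Int)
                  = (c + 1 + (i:Int), f - 1 - (i:Int)) :=
                pv_pair_eq (by push_cast; ring) (by push_cast; ring)
              rw [e]; exact h2.2.2
          · have e : ((c + ((k+1:Nat):Int) + 1, f - ((k+1:Nat):Int) - 1) : Int × Int)
                = (c + 1 + (k:Int) + 1, f - 1 - (k:Int) - 1) :=
              pv_pair_eq (by push_cast; ring) (by push_cast; ring)
            rw [e]; exact hhit
        · rintro ⟨k, hk, hall, hhit⟩
          cases k with
          | zero =>
            exfalso; apply hh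
            have e : ((c + ((0:Nat):Int) + 1, f - ((0:Nat):Int) - 1) : Int × Int) = (c + 1, f - 1) :=
              pv_pair_eq (by push_cast; ring) (by push_cast; ring)
            rw [e] at hhit; exact hhit
          | succ k =>
            refine ⟨k, by omega, ?_, ?_⟩
            · intro j hj
              have h2 := hall (j + 1) (by omega)
              refine ⟨by push_cast at h2 ⊢; omega, by push_cast at h2 ⊢; omega, ?_⟩
              have e : ((c + ((j+1:Nat):Int), f - ((j+1:Nat):Int)) : Int × Int)
                  = (c + 1 + (j:Int), f - 1 - (j:Int)) :=
                pv_pair_eq (by push_cast; ring) (by push_cast; ring)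
              rw [e] at h2; exact h2.2.2
            · have e : ((c + ((k+1:Nat):Int) + 1, f - ((k+1:Nat):Int) - 1) : Int × Int)
                  = (c + 1 + (k:Int) + 1, f - 1 - (k:Int) - 1) :=
                pv_pair_eq (by push_cast; ring) (by push_cast; ring)
              rw [e] at hhit; exact hhit
    · rw [pvALoopR, if_neg hc]
      simp only [Bool.false_eq_true, false_iff]
      rintro ⟨k, _, hall, _⟩
      have h0 := hall 0 (by omega)
      apply hc
      have e : ((c + ((0:Nat):Int), f - ((0:Nat):Int)) : Int × Int) = (c, f) :=
        pv_pair_eq (by push_cast; ring) (by push_cast; ring)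
      rw [e] at h0
      exact ⟨by push_cast at h0; omega, by push_cast at h0; omega, h0.2.2⟩

lemma pvALoopL_iff (own opp : List (Int × Int)) :
    ∀ (n : Nat) (c f : Int), pvALoopL own opp n c f = true ↔
      ∃ k : Nat, k < n ∧
        (∀ j : Nat, j ≤ k → (c - (j:Int) ≥ 1 ∧ f + (j:Int) ≤ 8 ∧ (c - (j:Int), f + (j:Int)) ∈ opp))
        ∧ (c - (k:Int) - 1, f + (k:Int) + 1) ∈ own := by
  intro n
  induction n with
  | zero => intro c f; simp [pvALoopL]
  | succ n ih =>
    intro c f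
    by_cases hc : c ≥ 1 ∧ f ≤ 8 ∧ (c, f) ∈ opp
    · by_cases hh : (c - 1, f + 1) ∈ own
      · rw [pvALoopL, if_pos hc, if_pos hh]
        constructor
        · intro _
          refine ⟨0, by omega, ?_, ?_⟩
          · intro j hj
            interval_cases j
            simpa using hc
          · have e : ((c - ((0:Nat):Int) - 1, f + ((0:Nat):Int) + 1) : Int × Int) = (c - 1, f + 1) :=
              pv_pair_eq (by push_cast; ring) (by push_cast; ring)
            rw [e]; exact hh
        · intro _; rfl
      · rw [pvALoopL, if_pos hc, if_neg hh, ih]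
        constructor
        · rintro ⟨k, hk, hall, hhit⟩
          refine ⟨k + 1, by omega, ?_, ?_⟩
          · intro j hj
            cases j with
            | zero => simpa using hc
            | succ i =>
              have h2 := hall i (by omega)
              refine ⟨by push_cast; omega, by push_cast; omega, ?_⟩
              have e : ((c - ((i+1:Nat):Int), f + ((i+1:Nat):Int)) : Int × Int)
                  = (c - 1 - (i:Int), f + 1 + (i:Int)) :=
                pv_pair_eq (by push_cast; ring) (by push_cast; ring)
              rw [e]; exact h2.2.2
          · have e : ((c - ((k+1:Nat):Int) - 1, f + ((k+1:Nat):Int) + 1) : Int × Int)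
                = (c - 1 - (k:Int) - 1, f + 1 + (k:Int) + 1) :=
              pv_pair_eq (by push_cast; ring) (by push_cast; ring)
            rw [e]; exact hhit
        · rintro ⟨k, hk, hall, hhit⟩
          cases k with
          | zero =>
            exfalso; apply hh
            have e : ((c - ((0:Nat):Int) - 1, f + ((0:Nat):Int) + 1) : Int × Int) = (c - 1, f + 1) :=
              pv_pair_eq (by push_cast; ring) (by push_cast; ring)
            rw [e] at hhit; exact hhit
          | succ k =>
            refine ⟨k, by omega, ?_, ?_⟩
            · intro j hj
              have h2 := hall (j + 1) (by omega)
              refine ⟨by push_cast at h2 ⊢; omega, by push_cast at h2 ⊢; omega, ?_⟩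
              have e : ((c - ((j+1:Nat):Int), f + ((j+1:Nat):Int)) : Int × Int)
                  = (c - 1 - (j:Int), f + 1 + (j:Int)) :=
                pv_pair_eq (by push_cast; ring) (by push_cast; ring)
              rw [e] at h2; exact h2.2.2
            · have e : ((c - ((k+1:Nat):Int) - 1, f + ((k+1:Nat):Int) + 1) : Int × Int)
                  = (c - 1 - (k:Int) - 1, f + 1 + (k:Int) + 1) :=
                pv_pair_eq (by push_cast; ring) (by push_cast; ring)
              rw [e] at hhit; exact hhit
    · rw [pvALoopL, if_neg hc]
      simp only [Bool.false_eq_true, false_iff]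
      rintro ⟨k, _, hall, _⟩
      have h0 := hall 0 (by omega)
      apply hc
      have e : ((c - ((0:Nat):Int), f + ((0:Nat):Int)) : Int × Int) = (c, f) :=
        pv_pair_eq (by push_cast; ring) (by push_cast; ring)
      rw [e] at h0
      exact ⟨by push_cast at h0; omega, by push_cast at h0; omega, h0.2.2⟩

-- variant of pv_k_lt for the left direction
lemma pv_k_lt_L {opp : List (Int × Int)} {c f : Int} {k : Nat}
    (h : ∀ j : Nat, j ≤ k → (c - (j:Int), f + (j:Int)) ∈ opp) : k < opp.length := by
  have hinj : Function.Injective (fun j : Nat => ((c - (j:Int), f + (j:Int)) : Int × Int)) := by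
    intro a b hab
    simp only [Prod.mk.injEq] at hab
    omega
  have hnd : ((List.range (k+1)).map (fun j : Nat => ((c - (j:Int), f + (j:Int)) : Int × Int))).Nodup :=
    (List.nodup_range).map hinj
  have hsub : ((List.range (k+1)).map (fun j : Nat => ((c - (j:Int), f + (j:Int)) : Int × Int))) ⊆ opp := by
    intro x hx
    simp only [List.mem_map, List.mem_range] at hx
    obtain ⟨j, hj, rfl⟩ := hx
    exact h j (by omega)
  have := (List.subperm_of_subset hnd hsub).length_le
  simp at this
  omega

lemma pvALoopR_start (own opp : List (Int × Int)) (c0 f0 : Int) :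
    pvALoopR own opp (opp.length + 1) (c0 + 1) (f0 - 1) = true ↔ pvPropR own opp c0 f0 := by
  rw [pvALoopR_iff]
  unfold pvPropR
  constructor
  · rintro ⟨k, _, hall, hhit⟩; exact ⟨k, hall, hhit⟩
  · rintro ⟨k, hall, hhit⟩
    have hb : k < opp.length := pv_k_lt (fun j hj => (hall j hj).2.2)
    exact ⟨k, by omega, hall, hhit⟩

lemma pvALoopL_start (own opp : List (Int × Int)) (c0 f0 : Int) :
    pvALoopL own opp (opp.length + 1) (c0 - 1) (f0 + 1) = true ↔ pvPropL own opp c0 f0 := by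
  rw [pvALoopL_iff]
  unfold pvPropL
  constructor
  · rintro ⟨k, _, hall, hhit⟩; exact ⟨k, hall, hhit⟩
  · rintro ⟨k, hall, hhit⟩
    have hb : k < opp.length := pv_k_lt_L (fun j hj => (hall j hj).2.2)
    exact ⟨k, by omega, hall, hhit⟩

lemma pv_if_or (a b : Bool) : (if a then true else b) = (a || b) := by
  cases a <;> simp

lemma pvB_any (own opp : List (Int × Int)) (c0 f0 : Int) :
    (own.any (fun p =>
      if p.1 + p.2 == c0 + f0 then
        let t := p.1 - c0
        if t ≥ 2 then pvBBetweenR (PySem.Set.ofList opp) c0 f0 t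
        else if t ≤ -2 then pvBBetweenL (PySem.Set.ofList opp) c0 f0 t
        else false
      else false)) = true ↔ pvPropR own opp c0 f0 ∨ pvPropL own opp c0 f0 := by
  rw [List.any_eq_true]
  constructor
  · rintro ⟨⟨pc, pf⟩, hp, hpred⟩
    simp only [beq_iff_eq] at hpred
    by_cases hd : pc + pf = c0 + f0
    swap
    · rw [if_neg hd] at hpred; exact absurd hpred (by simp)
    rw [if_pos hd] at hpred
    by_cases ht1 : pc - c0 ≥ 2
    · rw [if_pos ht1] at hpred
      left
      have hk : (((pc - c0 - 2).toNat : Int)) = pc - c0 - 2 := Int.toNat_of_nonneg (by omega)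
      refine ⟨(pc - c0 - 2).toNat, ?_, ?_⟩
      · intro j hj
        unfold pvBBetweenR at hpred
        rw [List.all_eq_true] at hpred
        have hmem : ((j:Int) + 1) ∈ PySem.List.pyRange 1 (pc - c0) 1 := by
          rw [PySem.List.mem_pyRange_one]; omega
        have hi := hpred _ hmem
        simp only [Bool.and_eq_true, decide_eq_true_eq, PySem.Set.mem_ofList] at hi
        obtain ⟨⟨hb1, hb2⟩, hmem2⟩ := hi
        refine ⟨by omega, by omega, ?_⟩
        have e : ((c0 + 1 + (j:Int), f0 - 1 - (j:Int)) : Int × Int)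
            = (c0 + ((j:Int) + 1), f0 - ((j:Int) + 1)) :=
          pv_pair_eq (by ring) (by ring)
        rw [e]; exact hmem2
      · have e : ((c0 + 1 + (((pc - c0 - 2).toNat : Nat):Int) + 1,
            f0 - 1 - (((pc - c0 - 2).toNat : Nat):Int) - 1) : Int × Int) = (pc, pf) :=
          pv_pair_eq (by omega) (by omega)
        rw [e]; exact hp
    · rw [if_neg ht1] at hpred
      by_cases ht2 : pc - c0 ≤ -2
      swap
      · rw [if_neg ht2] at hpred; exact absurd hpred (by simp)
      rw [if_pos ht2] at hpred
      right
      have hk : (((c0 - pc - 2).toNat : Int)) = c0 - pc - 2 := Int.toNat_of_nonneg (by omega)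
      refine ⟨(c0 - pc - 2).toNat, ?_, ?_⟩
      · intro j hj
        unfold pvBBetweenL at hpred
        rw [List.all_eq_true] at hpred
        have hmem : (-((j:Int) + 1)) ∈ PySem.List.pyRange (pc - c0 + 1) 0 1 := by
          rw [PySem.List.mem_pyRange_one]; omega
        have hi := hpred _ hmem
        simp only [Bool.and_eq_true, decide_eq_true_eq, PySem.Set.mem_ofList] at hi
        obtain ⟨⟨hb1, hb2⟩, hmem2⟩ := hi
        refine ⟨by omega, by omega, ?_⟩
        have e : ((c0 - 1 - (j:Int), f0 + 1 + (j:Int)) : Int × Int)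
            = (c0 + -((j:Int) + 1), f0 - -((j:Int) + 1)) :=
          pv_pair_eq (by ring) (by ring)
        rw [e]; exact hmem2
      · have e : ((c0 - 1 - (((c0 - pc - 2).toNat : Nat):Int) - 1,
            f0 + 1 + (((c0 - pc - 2).toNat : Nat):Int) + 1) : Int × Int) = (pc, pf) :=
          pv_pair_eq (by omega) (by omega)
        rw [e]; exact hp
  · rintro (⟨k, hall, hhit⟩ | ⟨k, hall, hhit⟩)
    · refine ⟨(c0 + 1 + (k:Int) + 1, f0 - 1 - (k:Int) - 1), hhit, ?_⟩
      simp only [beq_iff_eq]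
      rw [if_pos (by ring)]
      rw [if_pos (by omega)]
      unfold pvBBetweenR
      rw [List.all_eq_true]
      intro i hi
      rw [PySem.List.mem_pyRange_one] at hi
      have hj : ((i - 1).toNat : Int) = i - 1 := Int.toNat_of_nonneg (by omega)
      have h2 := hall (i - 1).toNat (by omega)
      simp only [Bool.and_eq_true, decide_eq_true_eq, PySem.Set.mem_ofList]
      refine ⟨⟨by omega, by omega⟩, ?_⟩
      have e : ((c0 + 1 + (((i - 1).toNat : Nat):Int), f0 - 1 - (((i - 1).toNat : Nat):Int)) : Int × Int)
          = (c0 + 1 + 1 + (k:Int) + 1 - c0 - 1 + i - (k:Int) - 2 + c0,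
             f0 - 1 - (k:Int) - 1 - (f0 - 1 - (k:Int) - 1) + f0 - i) := by
        exact pv_pair_eq (by omega) (by omega)
      rw [e] at h2
      have e2 : ((c0 + i, f0 - i) : Int × Int)
          = (c0 + 1 + 1 + (k:Int) + 1 - c0 - 1 + i - (k:Int) - 2 + c0,
             f0 - 1 - (k:Int) - 1 - (f0 - 1 - (k:Int) - 1) + f0 - i) :=
        pv_pair_eq (by ring) (by ring)
      rw [e2]; exact h2.2.2
    · refine ⟨(c0 - 1 - (k:Int) - 1, f0 + 1 + (k:Int) + 1), hhit, ?_⟩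
      simp only [beq_iff_eq]
      rw [if_pos (by ring)]
      rw [if_neg (by omega), if_pos (by omega)]
      unfold pvBBetweenL
      rw [List.all_eq_true]
      intro j hj
      rw [PySem.List.mem_pyRange_one] at hj
      have hm : ((-j - 1).toNat : Int) = -j - 1 := Int.toNat_of_nonneg (by omega)
      have h2 := hall (-j - 1).toNat (by omega)
      simp only [Bool.and_eq_true, decide_eq_true_eq, PySem.Set.mem_ofList]
      refine ⟨⟨by omega, by omega⟩, ?_⟩
      have e : ((c0 - 1 - (((-j - 1).toNat : Nat):Int), f0 + 1 + (((-j - 1).toNat : Nat):Int)) : Int × Int)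
          = (c0 + j, f0 - j) :=
        pv_pair_eq (by omega) (by omega)
      rw [e] at h2
      exact h2.2.2

-- ===== VERDICT (by name: the statement is the Claim_ definition above) =====
theorem generaDiagonalSup_spec : Claim_equal_generaDiagonalSup := by
  intro fv fj fm turno _
  unfold Spec_generaDiagonalSup generaDiagonalSup generaDiagonalSup_alt
  by_cases ht : turno == "jugador"
  · simp only [ht, if_true]
    rw [pv_if_or, Bool.eq_iff_iff, Bool.or_eq_true, pvALoopR_start, pvALoopL_start, pvB_any]
  · simp only [ht, Bool.false_eq_true, if_false]
    rw [pv_if_or, Bool.eq_iff_iff, Bool.or_eq_true, pvALoopR_start, pvALoopL_start, pvB_any]
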